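-- pv_equiv track=rewrite | github.com/quythanh/dotfiles | .config/waybar/utils/update-show.py | join_table
-- ===== SOURCE A (Python) =====
-- def join_table(table_1, table_2):
--     if (table_1 == ""): return table_2
--     if (table_2 == ""): return table_1
--
--     i = 0
--     table = ""
--     while i < len(table_1) and i < len(table_2):
--         table += "{:<101s} {:<101s}\n".format(table_1[i], table_2[i])
--         i = i + 1
--
--     while i < len(table_1):
--         table += table_1[i] + '\n'
--         i = i + 1
--     while i < len(table_2):
--         table += "{:<101s} {:<101s}\n".format('', table_2[i])
--         i = i + 1
--
--     return table
-- ===== SOURCE B (Python) =====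
-- def _row(a, b):
--     if b is None:
--         return a + "\n"
--     if a is None:
--         return "{:<101s} {:<101s}\n".format('', b)
--     return "{:<101s} {:<101s}\n".format(a, b)
--
--
-- def _merge(t1, t2):
--     # divide and conquer: split both tables at the same row index, merge halves,
--     # concatenate the two balanced results
--     n = max(len(t1), len(t2))
--     if n == 0:
--         return ""
--     if n == 1:
--         return _row(t1[0] if t1 else None, t2[0] if t2 else None)
--     mid = n // 2
--     return _merge(t1[:mid], t2[:mid]) + _merge(t1[mid:], t2[mid:])
--
--
-- def join_table(table_1, table_2):
--     if table_1 == "":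
--         return table_2
--     if table_2 == "":
--         return table_1
--     return _merge(table_1, table_2)
-- ===== Notes on version B (the rewrite author's own statement) =====
-- stated objective: alternative
-- what changed: A's three index-driven while-loops growing one string with += are replaced by a divide-and-conquer merge: both tables are split at the same row index, the halves are merged recursively and the two results concatenated (a one-row base case does the per-row formatting), so string concatenation is balanced instead of a linear left-fold.
import Mathlib
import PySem

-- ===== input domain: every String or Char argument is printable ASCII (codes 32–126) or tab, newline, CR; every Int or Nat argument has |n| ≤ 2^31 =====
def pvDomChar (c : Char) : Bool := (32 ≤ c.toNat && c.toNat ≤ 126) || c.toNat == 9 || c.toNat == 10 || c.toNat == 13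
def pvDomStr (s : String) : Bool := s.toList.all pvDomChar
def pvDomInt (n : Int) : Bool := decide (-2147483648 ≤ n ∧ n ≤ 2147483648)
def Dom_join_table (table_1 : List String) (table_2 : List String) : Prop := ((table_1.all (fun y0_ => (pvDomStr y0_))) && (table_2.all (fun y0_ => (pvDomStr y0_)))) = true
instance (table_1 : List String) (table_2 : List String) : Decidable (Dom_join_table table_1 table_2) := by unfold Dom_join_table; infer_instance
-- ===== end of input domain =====

-- B replaces A's three sequential while-loops (a linear left-fold growing one string with +=)
-- by a divide-and-conquer merge: split both tables at the same row index, merge the halves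
-- recursively, concatenate; return-value equivalence (alternative algorithm, no speed claim).

-- ===== PORT A =====
-- "{:<101s}": left-justify in a field of width 101, space-padded, no truncation
def pad101 (s : String) : String :=
  s ++ String.ofList (List.replicate (101 - s.toList.length) ' ')

-- third loop: while i < len(table_2): table += "{:<101s} {:<101s}\n".format('', table_2[i])
def joinLoop3 (t2 : List String) (i : Nat) (acc : String) : String :=
  if i < t2.length then
    joinLoop3 t2 (i + 1) (acc ++ pad101 "" ++ " " ++ pad101 (t2.getD i "") ++ "\n")
  else acc
termination_by t2.length - i
decreasing_by omega

-- second loop: while i < len(table_1): table += table_1[i] + '\n'; then falls through to loop 3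
def joinLoop2 (t1 t2 : List String) (i : Nat) (acc : String) : String :=
  if i < t1.length then joinLoop2 t1 t2 (i + 1) (acc ++ t1.getD i "" ++ "\n")
  else joinLoop3 t2 i acc
termination_by t1.length - i
decreasing_by omega

-- first loop: while i < len(table_1) and i < len(table_2); then falls through to loop 2
def joinLoop1 (t1 t2 : List String) (i : Nat) (acc : String) : String :=
  if i < t1.length ∧ i < t2.length then
    joinLoop1 t1 t2 (i + 1)
      (acc ++ pad101 (t1.getD i "") ++ " " ++ pad101 (t2.getD i "") ++ "\n")
  else joinLoop2 t1 t2 i acc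
termination_by t1.length - i
decreasing_by omega

-- The guards `table_1 == ""` / `table_2 == ""` compare a list with a string in Python,
-- which is always False for these arguments, so they are no-ops in this port.
def join_table (table_1 : List String) (table_2 : List String) : String :=
  joinLoop1 table_1 table_2 0 ""

-- ===== PORT B =====
-- _row: format one merged row; a missing side is the None sentinel.
-- (the none/none arm is unreachable from pvMerge — there n = 1 forces one side non-empty)
def pvRow (a : Option String) (b : Option String) : String :=
  match a, b with
  | some x, none => x ++ "\n"
  | none, some y => pad101 "" ++ " " ++ pad101 y ++ "\n"
  | some x, some y => pad101 x ++ " " ++ pad101 y ++ "\n"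
  | none, none => ""

-- _merge: split both tables at the same row index, recurse on halves, concatenate.
-- The fuel argument is only a structural-termination guard: it starts at
-- t1.length + t2.length and always exceeds the recursion depth, so the fuel-0
-- branch is unreachable (except when both tables are empty, where "" is the result anyway).
def pvMerge (fuel : Nat) (t1 t2 : List String) : String :=
  match fuel with
  | 0 => ""
  | fuel + 1 =>
    let n := max t1.length t2.length
    if n = 0 then ""
    else if n = 1 then pvRow t1.head? t2.head?
    else
      let mid := n / 2
      pvMerge fuel (t1.take mid) (t2.take mid) ++ pvMerge fuel (t1.drop mid) (t2.drop mid)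

-- the `== ""` guards are likewise always-False no-ops here
def join_table_alt (table_1 : List String) (table_2 : List String) : String :=
  pvMerge (table_1.length + table_2.length) table_1 table_2

-- ===== PRECONDITION & SPEC =====
def Spec_join_table (table_1 : List String) (table_2 : List String) (out : String) : Prop := out = join_table_alt table_1 table_2
instance (table_1 : List String) (table_2 : List String) (out : String) : Decidable (Spec_join_table table_1 table_2 out) := by unfold Spec_join_table; infer_instance

-- ===== CLAIM (what is proved, stated in full; the proofs are below) =====
def Claim_equal_join_table : Prop := ∀ (table_1 : List String) (table_2 : List String), Dom_join_table table_1 table_2 → Spec_join_table table_1 table_2 (join_table table_1 table_2)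

-- ===== LEMMAS AND PROOFS =====

-- proof-only intermediate: the list of merged rows, one per input row
def zipRows : List String → List String → List String
  | [], [] => []
  | a :: t1, [] => (a ++ "\n") :: zipRows t1 []
  | [], b :: t2 => (pad101 "" ++ " " ++ pad101 b ++ "\n") :: zipRows [] t2
  | a :: t1, b :: t2 => (pad101 a ++ " " ++ pad101 b ++ "\n") :: zipRows t1 t2

theorem foldl_append_str (l : List String) (s : String) :
    l.foldl (fun r t => r ++ t) s = s ++ l.foldl (fun r t => r ++ t) "" := by
  induction l generalizing s with
  | nil => simp
  | cons t l ih =>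
    simp only [List.foldl]
    rw [ih (s ++ t), ih (("" : String) ++ t)]
    simp [String.append_assoc]

theorem join_cons (s : String) (l : List String) :
    String.join (s :: l) = s ++ String.join l := by
  simp only [String.join, List.foldl]
  rw [foldl_append_str l (("" : String) ++ s)]
  simp

theorem join_append (l1 l2 : List String) :
    String.join (l1 ++ l2) = String.join l1 ++ String.join l2 := by
  induction l1 with
  | nil => simp [String.join]
  | cons s l ih => simp [join_cons, ih, String.append_assoc]

-- ---- A-side: the three loops compute the joined row list ----

theorem joinLoop3_eq (t2 : List String) (i : Nat) (acc : String) :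
    joinLoop3 t2 i acc = acc ++ String.join (zipRows [] (t2.drop i)) := by
  induction h : t2.length - i generalizing i acc with
  | zero =>
    rw [joinLoop3]
    have : ¬ i < t2.length := by omega
    simp [this, List.drop_eq_nil_of_le (show t2.length ≤ i by omega), zipRows, String.join]
  | succ n ih =>
    rw [joinLoop3]
    have hi : i < t2.length := by omega
    rw [List.drop_eq_getElem_cons hi]
    simp only [hi, if_pos, zipRows, join_cons, ih (i+1) _ (by omega)]
    simp [List.getElem?_eq_getElem hi, String.append_assoc]

theorem joinLoop2_eq (t1 t2 : List String) (i : Nat) (acc : String)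
    (h2 : t2.length ≤ i) :
    joinLoop2 t1 t2 i acc = acc ++ String.join (zipRows (t1.drop i) (t2.drop i)) := by
  induction h : t1.length - i generalizing i acc with
  | zero =>
    rw [joinLoop2]
    have : ¬ i < t1.length := by omega
    simp [this, joinLoop3_eq, List.drop_eq_nil_of_le (show t1.length ≤ i by omega)]
  | succ n ih =>
    rw [joinLoop2]
    have hi : i < t1.length := by omega
    rw [List.drop_eq_getElem_cons hi, List.drop_eq_nil_of_le h2]
    simp only [hi, if_pos, zipRows, join_cons,
      ih (i+1) _ (by omega) (by omega)]
    rw [List.drop_eq_nil_of_le (show t2.length ≤ i + 1 by omega)]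
    simp [List.getElem?_eq_getElem hi, String.append_assoc]

theorem joinLoop1_eq (t1 t2 : List String) (i : Nat) (acc : String) :
    joinLoop1 t1 t2 i acc = acc ++ String.join (zipRows (t1.drop i) (t2.drop i)) := by
  induction h : t1.length - i generalizing i acc with
  | zero =>
    rw [joinLoop1]
    have h1 : ¬ i < t1.length := by omega
    simp only [h1, false_and, if_neg, not_false_iff]
    by_cases h2 : i < t2.length
    · rw [joinLoop2]
      simp [h1, joinLoop3_eq, List.drop_eq_nil_of_le (show t1.length ≤ i by omega)]
    · exact joinLoop2_eq t1 t2 i acc (by omega)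
  | succ n ih =>
    rw [joinLoop1]
    have h1 : i < t1.length := by omega
    by_cases h2 : i < t2.length
    · rw [List.drop_eq_getElem_cons h1, List.drop_eq_getElem_cons h2]
      simp only [h1, h2, and_self, if_pos, zipRows, join_cons,
        ih (i+1) _ (by omega)]
      simp [List.getElem?_eq_getElem h1, List.getElem?_eq_getElem h2,
        String.append_assoc]
    · have : ¬ (i < t1.length ∧ i < t2.length) := by omega
      simp only [this, if_neg, not_false_iff]
      exact joinLoop2_eq t1 t2 i acc (by omega)

-- ---- B-side: splitting both tables at the same index splits the row list ----

theorem zipRows_split (m : Nat) (t1 t2 : List String) :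
    zipRows t1 t2 = zipRows (t1.take m) (t2.take m) ++ zipRows (t1.drop m) (t2.drop m) := by
  induction m generalizing t1 t2 with
  | zero => simp [zipRows]
  | succ m ih =>
    cases t1 with
    | nil =>
      cases t2 with
      | nil => simp [zipRows]
      | cons b t2 => simp [zipRows, List.take_succ_cons, List.drop_succ_cons, ih [] t2]
    | cons a t1 =>
      cases t2 with
      | nil => simp [zipRows, List.take_succ_cons, List.drop_succ_cons, ih t1 []]
      | cons b t2 => simp [zipRows, List.take_succ_cons, List.drop_succ_cons, ih t1 t2]

theorem pvMerge_eq (fuel : Nat) (t1 t2 : List String)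
    (hf : t1.length + t2.length ≤ fuel) :
    pvMerge fuel t1 t2 = String.join (zipRows t1 t2) := by
  induction fuel generalizing t1 t2 with
  | zero =>
    have e1 : t1 = [] := List.eq_nil_of_length_eq_zero (by omega)
    have e2 : t2 = [] := List.eq_nil_of_length_eq_zero (by omega)
    simp [pvMerge, e1, e2, zipRows, String.join]
  | succ fuel ih =>
    rw [pvMerge]
    by_cases h0 : max t1.length t2.length = 0
    · have e1 : t1 = [] := List.eq_nil_of_length_eq_zero (by omega)
      have e2 : t2 = [] := List.eq_nil_of_length_eq_zero (by omega)
      simp [h0, e1, e2, zipRows, String.join]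
    · by_cases h1 : max t1.length t2.length = 1
      · simp only [h0, h1, if_neg, if_pos, not_false_iff]
        cases t1 with
        | nil =>
          cases t2 with
          | nil => simp only [List.length_nil] at h1; omega
          | cons b t2 =>
            have : t2 = [] := List.eq_nil_of_length_eq_zero (by simp only [List.length_cons] at h1; omega)
            subst this
            simp [pvRow, zipRows, String.join]
        | cons a t1 =>
          have ht1 : t1 = [] := List.eq_nil_of_length_eq_zero (by simp only [List.length_cons] at h1; omega)
          subst ht1
          cases t2 with
          | nil => simp [pvRow, zipRows, String.join]
          | cons b t2 =>
            have : t2 = [] := List.eq_nil_of_length_eq_zero (by simp only [List.length_cons] at h1; omega)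
            subst this
            simp [pvRow, zipRows, String.join]
      · simp only [h0, h1, if_neg, not_false_iff]
        set mid := max t1.length t2.length / 2 with hmid
        have hm1 : 1 ≤ mid := by omega
        have hml : mid < max t1.length t2.length := by omega
        rw [ih (t1.take mid) (t2.take mid) (by simp only [List.length_take]; omega),
            ih (t1.drop mid) (t2.drop mid) (by simp only [List.length_drop]; omega),
            ← join_append, ← zipRows_split]

-- ===== VERDICT (by name: the statement is the Claim_ definition above) =====
theorem join_table_spec : Claim_equal_join_table := by
  intro t1 t2 _
  show join_table t1 t2 = join_table_alt t1 t2
  rw [join_table, join_table_alt, joinLoop1_eq, pvMerge_eq _ t1 t2 le_rfl]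
  simp
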